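-- pv_equiv track=rewrite | github.com/gordon8018/ai-devops | packages/agent_sdk/models/router.py | escalate
-- ===== SOURCE A (Python) =====
-- TASK_ROUTE_TABLE: dict[str, tuple[str, str]] = {
--     "code_generation": ("openai", "gpt-5.4"),
--     "code_review": ("anthropic", "claude-opus-4-6"),
--     "bug_fix": ("openai", "gpt-5.4"),
--     "refactor": ("openai", "gpt-5.4"),
--     "documentation": ("anthropic", "claude-sonnet-4-6"),
--     "test_generation": ("openai", "gpt-5.4-mini"),
--     "planning": ("anthropic", "claude-opus-4-6"),
--     "incident_analysis": ("anthropic", "claude-opus-4-6"),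
-- }
--
-- DEFAULT_ROUTE: tuple[str, str] = ("openai", "gpt-5.4")
--
-- _ESCALATION: list[tuple[str, str]] = [
--     ("openai", "gpt-5.4-mini"),
--     ("openai", "gpt-5.4"),
--     ("anthropic", "claude-sonnet-4-6"),
--     ("anthropic", "claude-opus-4-6"),
-- ]
--
-- def _provider_for_model(current_model: str) -> str:
--     for provider, model in _ESCALATION:
--         if model == current_model:
--             return provider
--
--     for provider, model in TASK_ROUTE_TABLE.values():
--         if model == current_model:
--             return provider
--
--     if DEFAULT_ROUTE[1] == current_model:
--         return DEFAULT_ROUTE[0]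
--
--     return DEFAULT_ROUTE[0]
--
-- def escalate(current_model: str) -> tuple[str, str]:
--     for index, route in enumerate(_ESCALATION):
--         provider, model = route
--         if model != current_model:
--             continue
--         if index < len(_ESCALATION) - 1:
--             next_provider, next_model = _ESCALATION[index + 1]
--             if next_provider == provider:
--                 return next_provider, next_model
--         return provider, model
--
--     return _provider_for_model(current_model), current_model
-- ===== SOURCE B (Python) =====
-- # Precomputed escalation map: one pass over _ESCALATION builds it; escalate is a single dict lookup.
-- _ESCALATION = [
--     ("openai", "gpt-5.4-mini"),
--     ("openai", "gpt-5.4"),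
--     ("anthropic", "claude-sonnet-4-6"),
--     ("anthropic", "claude-opus-4-6"),
-- ]
--
-- _MAP = {}
-- for _i, (_p, _m) in enumerate(_ESCALATION):
--     if _i + 1 < len(_ESCALATION) and _ESCALATION[_i + 1][0] == _p:
--         _MAP[_m] = _ESCALATION[_i + 1]
--     else:
--         _MAP[_m] = (_p, _m)
--
-- def escalate(current_model: str) -> tuple[str, str]:
--     return _MAP.get(current_model, ("openai", current_model))
-- ===== Notes on version B (the rewrite author's own statement) =====
-- stated objective: simpler
-- what changed: Replaces the indexed scan with next-entry peek and the whole _provider_for_model fallback chain by a precomputed source-model -> (provider, model) map built once from _ESCALATION; escalate becomes a single dict .get with ('openai', current_model) as default, which is valid because _provider_for_model always returns 'openai' for models outside _ESCALATION.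
import Mathlib
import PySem

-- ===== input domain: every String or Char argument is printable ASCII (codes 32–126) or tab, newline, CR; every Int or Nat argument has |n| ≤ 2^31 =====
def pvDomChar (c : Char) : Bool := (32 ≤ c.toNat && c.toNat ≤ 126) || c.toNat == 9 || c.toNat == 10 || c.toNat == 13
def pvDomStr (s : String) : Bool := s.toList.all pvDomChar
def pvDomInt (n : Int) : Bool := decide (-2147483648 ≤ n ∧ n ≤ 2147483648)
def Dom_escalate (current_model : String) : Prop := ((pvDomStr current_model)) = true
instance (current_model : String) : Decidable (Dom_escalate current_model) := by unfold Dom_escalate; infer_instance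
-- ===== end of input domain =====

-- B replaces A's indexed scan + peek and its _provider_for_model fallback by one precomputed
-- source-model -> (provider, model) map with a single default lookup (objective: simpler).

-- ===== PORT A =====
def ESCALATION : List (String × String) :=
  [("openai", "gpt-5.4-mini"), ("openai", "gpt-5.4"),
   ("anthropic", "claude-sonnet-4-6"), ("anthropic", "claude-opus-4-6")]

def ROUTE_VALUES : List (String × String) :=
  [("openai", "gpt-5.4"), ("anthropic", "claude-opus-4-6"), ("openai", "gpt-5.4"),
   ("openai", "gpt-5.4"), ("anthropic", "claude-sonnet-4-6"), ("openai", "gpt-5.4-mini"),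
   ("anthropic", "claude-opus-4-6"), ("anthropic", "claude-opus-4-6")]

def DEFAULT_ROUTE : String × String := ("openai", "gpt-5.4")

-- first 'for' loop of _provider_for_model (also reused for the second loop: same shape)
def provScan (xs : List (String × String)) (current_model : String) : Option String :=
  match xs with
  | [] => none
  | (provider, model) :: rest =>
    if model = current_model then some provider else provScan rest current_model

def providerForModel (current_model : String) : String :=
  match provScan ESCALATION current_model with
  | some p => p
  | none =>
    match provScan ROUTE_VALUES current_model with
    | some p => p
    | none => if DEFAULT_ROUTE.2 = current_model then DEFAULT_ROUTE.1 else DEFAULT_ROUTE.1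

-- the enumerate loop of escalate, carrying the index
def escLoop (xs : List (String × String)) (index : Nat) (current_model : String) :
    Option (String × String) :=
  match xs with
  | [] => none
  | (provider, model) :: rest =>
    if model ≠ current_model then escLoop rest (index + 1) current_model
    else if index < ESCALATION.length - 1 then
      match PySem.List.pyGet? ESCALATION ((index : Int) + 1) with
      | some (next_provider, next_model) =>
        if next_provider = provider then (next_provider, next_model) else (provider, model)
      | none => (provider, model)
    else (provider, model)

def escalate (current_model : String) : String × String :=
  match escLoop ESCALATION 0 current_model with
  | some r => r
  | none => (providerForModel current_model, current_model)

-- ===== PORT B =====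
-- the map built by Source B's one pass (enumerate) over _ESCALATION
def escMapLoop : List (String × String) → Nat → PySem.Dict String (String × String) →
    PySem.Dict String (String × String)
  | [], _, d => d
  | (p, m) :: rest, i, d =>
    escMapLoop rest (i + 1)
      (if i + 1 < ESCALATION.length then
        match PySem.List.pyGet? ESCALATION ((i : Int) + 1) with
        | some nxt => if nxt.1 = p then d.insert m nxt else d.insert m (p, m)
        | none => d.insert m (p, m)
      else d.insert m (p, m))

def ESC_MAP : PySem.Dict String (String × String) := escMapLoop ESCALATION 0 ⟨[]⟩

def escalate_alt (current_model : String) : String × String :=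
  ESC_MAP.getD current_model ("openai", current_model)

-- ===== PRECONDITION & SPEC =====
def Spec_escalate (current_model : String) (out : String × String) : Prop := out = escalate_alt current_model
instance (current_model : String) (out : String × String) : Decidable (Spec_escalate current_model out) := by unfold Spec_escalate; infer_instance

-- ===== CLAIM (what is proved, stated in full; the proofs are below) =====
def Claim_equal_escalate : Prop := ∀ (current_model : String), Dom_escalate current_model → Spec_escalate current_model (escalate current_model)

-- ===== LEMMAS AND PROOFS =====

-- ===== VERDICT (by name: the statement is the Claim_ definition above) =====
theorem escalate_spec : Claim_equal_escalate := by
  intro m _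
  unfold Spec_escalate
  by_cases h1 : m = "gpt-5.4-mini"
  · subst h1; decide
  by_cases h2 : m = "gpt-5.4"
  · subst h2; decide
  by_cases h3 : m = "claude-sonnet-4-6"
  · subst h3; decide
  by_cases h4 : m = "claude-opus-4-6"
  · subst h4; decide
  · simp [escalate, escLoop, escalate_alt, providerForModel, provScan, ESCALATION, ROUTE_VALUES,
      DEFAULT_ROUTE, ESC_MAP, escMapLoop, PySem.List.pyGet?, PySem.List.pyIdx?,
      PySem.Dict.getD, PySem.Dict.get?, PySem.Dict.insert,
      Ne.symm h1, Ne.symm h2, Ne.symm h3, Ne.symm h4]
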